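-- pv_equiv track=rewrite | github.com/Bronzekorean/CYK_Parser | grammar.py | level_list
-- ===== SOURCE A (Python) =====
-- def level_list(line):
--     lvl_list = []
--     level = 0
--     symbols = line.split(' ')
--     for symbol in symbols:
--         lvl_list.append(level)
--         if '(' in symbol:
--             level += 1
--         else:
--             level -= symbol.count(')')
--     return lvl_list
-- ===== SOURCE B (Python) =====
-- def level_list(line):
--     deltas = [1 if '(' in tok else -tok.count(')') for tok in line.split(' ')]
--     return [sum(deltas[:i]) for i in range(len(deltas))]
-- ===== Notes on version B (the rewrite author's own statement) =====
-- stated objective: alternative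
-- what changed: replaces the stateful loop (running level accumulator appended per token) by a stateless map to per-token deltas followed by a closed-form prefix-sum comprehension
import Mathlib
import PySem

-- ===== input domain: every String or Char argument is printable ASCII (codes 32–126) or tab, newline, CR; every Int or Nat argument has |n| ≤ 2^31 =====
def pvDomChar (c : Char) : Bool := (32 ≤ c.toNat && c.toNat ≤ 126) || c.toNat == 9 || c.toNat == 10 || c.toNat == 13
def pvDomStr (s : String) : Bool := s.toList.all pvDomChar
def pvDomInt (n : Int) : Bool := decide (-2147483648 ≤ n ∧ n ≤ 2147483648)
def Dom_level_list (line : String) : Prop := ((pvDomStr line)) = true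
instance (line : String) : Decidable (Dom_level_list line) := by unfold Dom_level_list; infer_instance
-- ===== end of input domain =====

-- B replaces A's stateful append-and-update loop by a per-token delta map plus a closed-form prefix-sum comprehension (alternative decomposition, same results).

-- ===== PORT A =====
-- line.split(' ') with the literal nonempty separator: split? is always `some` here, getD only discharges the Option.
def level_list (line : String) : List Int :=
  let symbols := (PySem.Str.split? line " ").getD []
  (symbols.foldl
    (fun (st : List Int × Int) symbol =>
      (st.1 ++ [st.2],
        if PySem.Str.isIn "(" symbol then st.2 + 1
        else st.2 - (PySem.Str.count symbol ")" : Int)))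
    ([], 0)).1

-- ===== PORT B =====
def level_list_alt (line : String) : List Int :=
  let deltas := ((PySem.Str.split? line " ").getD []).map
    (fun tok => if PySem.Str.isIn "(" tok then (1 : Int) else -(PySem.Str.count tok ")" : Int))
  (PySem.List.pyRange 0 (deltas.length : Int) 1).map
    (fun i => (PySem.List.slice deltas none (some i)).sum)

-- ===== PRECONDITION & SPEC =====
def Spec_level_list (line : String) (out : List Int) : Prop := out = level_list_alt line
instance (line : String) (out : List Int) : Decidable (Spec_level_list line out) := by unfold Spec_level_list; infer_instance

-- ===== CLAIM (what is proved, stated in full; the proofs are below) =====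
def Claim_equal_level_list : Prop := ∀ (line : String), Dom_level_list line → Spec_level_list line (level_list line)

-- ===== LEMMAS AND PROOFS =====

def pvDelta (tok : String) : Int :=
  if PySem.Str.isIn "(" tok then (1 : Int) else -(PySem.Str.count tok ")" : Int)

-- A's foldl, started with an arbitrary prefix acc and level z, appends the z-started running levels.
theorem pvA_foldl (ts : List String) (acc : List Int) (z : Int) :
    (ts.foldl
      (fun (st : List Int × Int) symbol =>
        (st.1 ++ [st.2],
          if PySem.Str.isIn "(" symbol then st.2 + 1
          else st.2 - (PySem.Str.count symbol ")" : Int)))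
      (acc, z)).1
    = acc ++ (List.range ts.length).map (fun i => z + ((ts.take i).map pvDelta).sum) := by
  induction ts generalizing acc z with
  | nil => simp
  | cons t ts ih =>
    simp only [List.foldl_cons]
    rw [ih]
    simp only [List.length_cons]
    rw [List.range_succ_eq_map]
    simp only [List.map_cons, List.take_zero, List.map_nil, List.sum_nil, add_zero,
      List.map_map]
    rw [List.append_assoc]
    congr 1
    simp only [List.singleton_append]
    congr 1
    apply List.map_congr_left
    intro i _
    simp only [Function.comp_apply, List.take_succ_cons, List.map_cons, List.sum_cons, pvDelta,
      PySem.Str.isIn_eq, PySem.Str.count_eq, List.map_take]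
    split_ifs <;> ring

-- the two programs agree for any token list
theorem pv_key (ts : List String) :
    (ts.foldl
      (fun (st : List Int × Int) symbol =>
        (st.1 ++ [st.2],
          if PySem.Str.isIn "(" symbol then st.2 + 1
          else st.2 - (PySem.Str.count symbol ")" : Int)))
      ([], 0)).1
    = (PySem.List.pyRange 0 (((ts.map pvDelta).length : Nat) : Int) 1).map
        (fun i => (PySem.List.slice (ts.map pvDelta) none (some i)).sum) := by
  rw [pvA_foldl]
  rw [PySem.List.pyRange_one]
  simp only [List.nil_append, List.map_map, List.length_map, sub_zero, Int.toNat_natCast]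
  apply List.map_congr_left
  intro i _
  simp only [Function.comp_apply, zero_add]
  rw [PySem.List.slice_to_natCast]
  rw [← List.map_take]

-- ===== VERDICT (by name: the statement is the Claim_ definition above) =====
theorem level_list_spec : Claim_equal_level_list := by
  intro line _
  unfold Spec_level_list level_list level_list_alt
  exact pv_key ((PySem.Str.split? line " ").getD [])
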